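-- pv_equiv track=rewrite | github.com/jasonyandell/advent-of-code-2025 | day_01.py | part2
-- ===== SOURCE A (Python) =====
-- def move(direction:str, pos:int)->int:
--     if (direction=="L"):
--         pos -= 1
--     else:
--         pos += 1
--     return (pos + 1000000) % 100
--
-- def part2(commands:list[tuple[str, int]]):
--     pos = 50
--     zeroes = 0
--     for (direction, value) in commands:
--         for i in range(value):
--             pos = move(direction, pos)
--             if pos == 0: zeroes += 1
--
--     return zeroes
-- ===== SOURCE B (Python) =====
-- def part2(commands: list[tuple[str, int]]):
--     pos = 50
--     zeroes = 0
--     for direction, value in commands: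
--         if value > 0:
--             if direction == "L":
--                 first = pos if pos > 0 else 100
--                 step = -1
--             else:
--                 first = 100 - pos if pos > 0 else 100
--                 step = 1
--             if value >= first:
--                 zeroes += (value - first) // 100 + 1
--             pos = (pos + step * value) % 100
--     return zeroes
-- ===== Notes on version B (the rewrite author's own statement) =====
-- stated objective: faster
-- what changed: Replaced the per-unit-step inner loop with an O(1) closed-form count of multiples of 100 in each command's visited range (first hit + floor division), so B is O(n) in the number of commands instead of O(sum of values).
import Mathlib
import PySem

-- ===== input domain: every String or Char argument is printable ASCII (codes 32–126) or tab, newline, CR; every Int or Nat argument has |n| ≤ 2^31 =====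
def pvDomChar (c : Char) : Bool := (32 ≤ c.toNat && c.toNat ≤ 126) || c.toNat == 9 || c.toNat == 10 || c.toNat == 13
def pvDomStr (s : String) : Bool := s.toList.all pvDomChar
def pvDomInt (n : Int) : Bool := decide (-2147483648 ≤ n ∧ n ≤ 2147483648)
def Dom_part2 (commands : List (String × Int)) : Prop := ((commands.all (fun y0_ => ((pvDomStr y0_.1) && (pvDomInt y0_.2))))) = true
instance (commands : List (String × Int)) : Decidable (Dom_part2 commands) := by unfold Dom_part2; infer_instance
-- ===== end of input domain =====

-- ===== PORT A =====
-- B changes: closed-form per-command count instead of unit stepping (objective: faster).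
def moveA (direction : String) (pos : Int) : Int :=
  let pos := if direction == "L" then pos - 1 else pos + 1
  PySem.Int.mod (pos + 1000000) 100

-- inner 'for i in range(value)' loop of A (i is unused; value.toNat iterations)
def loopA (direction : String) : Nat → Int × Int → Int × Int
  | 0, st => st
  | n+1, st =>
      let pos := moveA direction st.1
      let z := if pos = 0 then st.2 + 1 else st.2
      loopA direction n (pos, z)

def stepA (st : Int × Int) (c : String × Int) : Int × Int :=
  loopA c.1 c.2.toNat st

def part2 (commands : List (String × Int)) : Int :=
  (commands.foldl stepA ((50 : Int), (0 : Int))).2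

-- ===== PORT B =====
def stepB (st : Int × Int) (c : String × Int) : Int × Int :=
  if c.2 > 0 then
    let fs : Int × Int :=
      if c.1 == "L" then (if st.1 > 0 then st.1 else 100, -1)
      else (if st.1 > 0 then 100 - st.1 else 100, 1)
    let z := if c.2 ≥ fs.1 then st.2 + PySem.Int.floordiv (c.2 - fs.1) 100 + 1 else st.2
    (PySem.Int.mod (st.1 + fs.2 * c.2) 100, z)
  else st

def part2_alt (commands : List (String × Int)) : Int :=
  (commands.foldl stepB ((50 : Int), (0 : Int))).2

-- ===== PRECONDITION & SPEC =====
def Spec_part2 (commands : List (String × Int)) (out : Int) : Prop := out = part2_alt commands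
instance (commands : List (String × Int)) (out : Int) : Decidable (Spec_part2 commands out) := by unfold Spec_part2; infer_instance

-- ===== CLAIM (what is proved, stated in full; the proofs are below) =====
def Claim_equal_part2 : Prop := ∀ (commands : List (String × Int)), Dom_part2 commands → Spec_part2 commands (part2 commands)

-- ===== LEMMAS AND PROOFS =====
lemma moveA_eq (d : String) (pos : Int) (_h0 : 0 ≤ pos) (_h1 : pos < 100) :
    moveA d pos = (pos + (if d == "L" then -1 else 1)) % 100 := by
  unfold moveA
  rw [PySem.Int.mod_eq_emod_of_pos (by norm_num)]
  split <;> omega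

lemma loopA_closed (d : String) (k : Nat) : ∀ (pos z : Int), 0 ≤ pos → pos < 100 →
    loopA d k (pos, z) =
      ((pos + (if d == "L" then -1 else 1) * k) % 100,
       z + (let first : Int := if d == "L" then (if pos > 0 then pos else 100)
                               else (if pos > 0 then 100 - pos else 100)
            if (k : Int) ≥ first then ((k : Int) - first) / 100 + 1 else 0)) := by
  induction k with
  | zero =>
      intro pos z h0 h1
      simp only [loopA, Nat.cast_zero, Prod.mk.injEq]
      refine ⟨by omega, ?_⟩
      split_ifs <;> omega
  | succ n ih =>
      intro pos z h0 h1
      have hm := moveA_eq d pos h0 h1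
      simp only [loopA, hm]
      have hpos' : 0 ≤ (pos + (if d == "L" then -1 else 1)) % 100 ∧
          (pos + (if d == "L" then -1 else 1)) % 100 < 100 := by omega
      rw [ih _ _ hpos'.1 hpos'.2]
      by_cases hd : d == "L" <;>
        simp only [hd, if_true, if_false, Bool.false_eq_true, Prod.mk.injEq] <;>
        push_cast <;> refine ⟨by omega, ?_⟩ <;> split_ifs <;> omega

lemma stepA_eq_stepB (st : Int × Int) (c : String × Int)
    (h0 : 0 ≤ st.1) (h1 : st.1 < 100) : stepA st c = stepB st c := by
  obtain ⟨pos, z⟩ := st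
  obtain ⟨d, v⟩ := c
  simp only [stepA, stepB]
  by_cases hv : v > 0
  · have hk : ((v.toNat : Int)) = v := by omega
    rw [loopA_closed d v.toNat pos z h0 h1]
    rw [if_pos hv, PySem.Int.mod_eq_emod_of_pos (by norm_num)]
    by_cases hd : d == "L" <;>
      simp only [hd, if_true, if_false, Bool.false_eq_true, hk, Prod.mk.injEq] <;>
      refine ⟨trivial, ?_⟩ <;>
      (split_ifs <;>
        first
          | (rw [PySem.Int.floordiv_eq_ediv_of_pos (show (0:Int) < 100 by norm_num)]; ring)
          | omega)
  · have : v.toNat = 0 := by omega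
    rw [this, if_neg hv]; rfl

lemma stepB_range (st : Int × Int) (c : String × Int)
    (h0 : 0 ≤ st.1) (h1 : st.1 < 100) : 0 ≤ (stepB st c).1 ∧ (stepB st c).1 < 100 := by
  unfold stepB
  by_cases h : c.2 > 0
  · rw [if_pos h]
    dsimp only
    rw [PySem.Int.mod_eq_emod_of_pos (by norm_num)]
    omega
  · rw [if_neg h]
    exact ⟨h0, h1⟩

lemma fold_eq (cmds : List (String × Int)) : ∀ (st : Int × Int), 0 ≤ st.1 → st.1 < 100 →
    cmds.foldl stepA st = cmds.foldl stepB st := by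
  induction cmds with
  | nil => intro st _ _; rfl
  | cons c cs ih =>
      intro st h0 h1
      have h := stepA_eq_stepB st c h0 h1
      have hr := stepB_range st c h0 h1
      simp only [List.foldl_cons, h]
      exact ih _ hr.1 hr.2

-- ===== VERDICT (by name: the statement is the Claim_ definition above) =====
theorem part2_spec : Claim_equal_part2 := by
  intro commands _
  unfold Spec_part2 part2 part2_alt
  rw [fold_eq commands (50, 0) (by norm_num) (by norm_num)]
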